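-- pv_equiv track=rewrite | github.com/Tanyafain123/Boggle | ex12_utils.py | path_validy
-- ===== SOURCE A (Python) =====
-- DIRECTIONS = [(-1, -1), (-1, 0), (-1, 1), (0, -1), (0, 1), (1, -1), (1, 0),
--               (1, 1)]
--
-- def path_validy(board, path):
--     """The function checks if the given path is valid in frame of limits of the board, that means is continuous and does
--      not exceed the limits of the board"""
--     cell_lst = board_coordinates(board)
--     for index in range(len(path) - 1):
--         coordinate = path[index]
--         if coordinate in cell_lst:
--             if path[index + 1] not in neighbors_finder(coordinate, cell_lst):
--                 return
--         else:
--             return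
--     return True
--
-- def neighbors_finder(coordinate, cell_lst):
--     """This function gets the coordinate on the board, seeks it's neighbour cells and adds them to the list.
--      Returns the list"""
--     x, y = coordinate
--     nieghbors_lst = []
--     for direction in DIRECTIONS:
--         new_x, new_y = direction
--         nieghbor = (x + new_x, y + new_y)
--         if nieghbor in cell_lst:
--             nieghbors_lst.append((x + new_x, y + new_y))
--     return nieghbors_lst
--
-- def board_coordinates(board):
--     """This function returns the list of cell coordinates"""
--     cell_lst = []
--     for i in range(len(board)):
--         for j in range(len(board)):
--             cell_lst.append((i, j))
--     return cell_lst
-- ===== SOURCE B (Python) =====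
-- def path_validy(board, path):
--     """The function checks if the given path is valid in frame of limits of the board, that means is continuous and does
--      not exceed the limits of the board"""
--     n = len(board)
--     for (x1, y1), (x2, y2) in zip(path, path[1:]):
--         if not (0 <= x1 < n and 0 <= y1 < n and 0 <= x2 < n and 0 <= y2 < n):
--             return
--         dx, dy = x2 - x1, y2 - y1
--         if (dx == 0 and dy == 0) or abs(dx) > 1 or abs(dy) > 1:
--             return
--     return True
-- ===== Notes on version B (the rewrite author's own statement) =====
-- stated objective: faster
-- what changed: B drops the materialised n*n coordinate list and the per-step 8-direction neighbour-list construction, checking bounds by direct inequalities and continuity by |dx|<=1, |dy|<=1, (dx,dy)!=(0,0) in one pass over consecutive path pairs.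
import Mathlib
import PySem

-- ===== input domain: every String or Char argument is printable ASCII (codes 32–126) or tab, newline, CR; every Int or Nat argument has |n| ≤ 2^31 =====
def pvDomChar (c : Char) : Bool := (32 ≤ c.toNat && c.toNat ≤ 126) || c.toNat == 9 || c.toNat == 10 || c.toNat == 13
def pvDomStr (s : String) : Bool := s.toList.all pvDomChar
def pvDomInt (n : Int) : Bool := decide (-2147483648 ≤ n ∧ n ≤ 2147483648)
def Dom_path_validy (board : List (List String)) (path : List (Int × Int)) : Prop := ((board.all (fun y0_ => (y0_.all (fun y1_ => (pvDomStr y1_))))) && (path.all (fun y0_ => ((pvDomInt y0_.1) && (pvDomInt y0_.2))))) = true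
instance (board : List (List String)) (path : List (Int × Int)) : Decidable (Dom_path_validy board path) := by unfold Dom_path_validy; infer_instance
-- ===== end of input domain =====

-- B replaces A's materialised coordinate list and per-step neighbour-list scan by direct
-- bounds inequalities and |dx|,|dy| ≤ 1 adjacency, O(len(path)) instead of O(len(path)·n²).

-- ===== PORT A =====
def pvDIRECTIONS : List (Int × Int) :=
  [(-1, -1), (-1, 0), (-1, 1), (0, -1), (0, 1), (1, -1), (1, 0), (1, 1)]

-- board_coordinates: nested loops over range(len(board)) appending (i, j)
def pvBoardCoordinates (board : List (List String)) : List (Int × Int) :=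
  (List.range board.length).foldl
    (fun acc i =>
      (List.range board.length).foldl
        (fun acc2 j => acc2 ++ [((i : Int), (j : Int))]) acc) []

-- neighbors_finder: scan DIRECTIONS, keep coordinate+direction when it is in cell_lst
def pvNeighborsFinder (coordinate : Int × Int) (cells : List (Int × Int)) : List (Int × Int) :=
  pvDIRECTIONS.foldl
    (fun acc d =>
      if (coordinate.1 + d.1, coordinate.2 + d.2) ∈ cells then
        acc ++ [(coordinate.1 + d.1, coordinate.2 + d.2)]
      else acc) []

-- the 'for index in range(len(path) - 1)' loop with its early returns (None → none)
def pvLoopA (cells : List (Int × Int)) : List (Int × Int) → Option Bool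
  | a :: b :: rest =>
    if a ∈ cells then
      if b ∈ pvNeighborsFinder a cells then pvLoopA cells (b :: rest) else none
    else none
  | _ => some true

def path_validy (board : List (List String)) (path : List (Int × Int)) : Option Bool :=
  pvLoopA (pvBoardCoordinates board) path

-- ===== PORT B =====
-- one pass over consecutive pairs: bounds by inequalities, adjacency by dx/dy
def pvLoopB (n : Int) : List (Int × Int) → Option Bool
  | (x1, y1) :: (x2, y2) :: rest =>
    if ¬(0 ≤ x1 ∧ x1 < n ∧ 0 ≤ y1 ∧ y1 < n ∧ 0 ≤ x2 ∧ x2 < n ∧ 0 ≤ y2 ∧ y2 < n) then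
      none
    else if (x2 - x1 = 0 ∧ y2 - y1 = 0) ∨ 1 < |x2 - x1| ∨ 1 < |y2 - y1| then
      none
    else pvLoopB n ((x2, y2) :: rest)
  | _ => some true

def path_validy_alt (board : List (List String)) (path : List (Int × Int)) : Option Bool :=
  pvLoopB (board.length : Int) path

-- ===== PRECONDITION & SPEC =====
def Spec_path_validy (board : List (List String)) (path : List (Int × Int)) (out : Option Bool) : Prop := out = path_validy_alt board path
instance (board : List (List String)) (path : List (Int × Int)) (out : Option Bool) : Decidable (Spec_path_validy board path out) := by unfold Spec_path_validy; infer_instance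

-- ===== CLAIM (what is proved, stated in full; the proofs are below) =====
def Claim_equal_path_validy : Prop := ∀ (board : List (List String)) (path : List (Int × Int)), Dom_path_validy board path → Spec_path_validy board path (path_validy board path)

-- ===== LEMMAS AND PROOFS =====

theorem mem_boardCoordinates (board : List (List String)) (x y : Int) :
    ((x, y) ∈ pvBoardCoordinates board) ↔
      (0 ≤ x ∧ x < (board.length : Int) ∧ 0 ≤ y ∧ y < (board.length : Int)) := by
  unfold pvBoardCoordinates
  rw [show (fun acc i =>
      (List.range board.length).foldl
        (fun acc2 j => acc2 ++ [((i : Int), (j : Int))]) acc) =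
      (fun (acc : List (Int × Int)) i =>
        acc ++ (List.range board.length).map (fun j => ((i : Int), (j : Int)))) from
    funext fun acc => funext fun i => PySem.List.foldl_append_singleton_eq_map ..]
  rw [PySem.List.foldl_append_eq_flatMap]
  simp
  constructor
  · rintro ⟨⟨i, hi, hx⟩, ⟨j, hj, hy⟩⟩
    omega
  · rintro ⟨h1, h2, h3, h4⟩
    exact ⟨⟨x.toNat, by omega, by omega⟩, ⟨y.toNat, by omega, by omega⟩⟩

theorem mem_neighborsFinder (a b : Int × Int) (cells : List (Int × Int)) :
    (b ∈ pvNeighborsFinder a cells) ↔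
      (b ∈ cells ∧ ¬(b.1 - a.1 = 0 ∧ b.2 - a.2 = 0) ∧ |b.1 - a.1| ≤ 1 ∧ |b.2 - a.2| ≤ 1) := by
  obtain ⟨x, y⟩ := a
  obtain ⟨u, v⟩ := b
  unfold pvNeighborsFinder
  rw [PySem.List.foldl_append_ite (p := fun d : Int × Int => ((x, y).1 + d.1, (x, y).2 + d.2) ∈ cells)
      (f := fun d : Int × Int => ((x, y).1 + d.1, (x, y).2 + d.2))]
  simp only [List.nil_append, List.mem_map, List.mem_filter, decide_eq_true_eq, pvDIRECTIONS,
    List.mem_cons, List.not_mem_nil, or_false, Prod.mk.injEq]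
  constructor
  · rintro ⟨⟨dx, dy⟩, ⟨hd, hmem⟩, h1, h2⟩
    simp only [Prod.mk.injEq] at hd
    dsimp only at h1 h2 hmem ⊢
    subst h1; subst h2
    refine ⟨hmem, ?_, ?_, ?_⟩ <;>
      (rcases hd with h|h|h|h|h|h|h|h <;> obtain ⟨e1, e2⟩ := h <;> subst e1 <;> subst e2 <;>
        (first | (simp only [abs_le]; omega) | omega))
  · rintro ⟨hmem, hnz, hx, hy⟩
    rw [abs_le] at hx hy
    refine ⟨(u - x, v - y), ⟨?_, ?_⟩, by dsimp only; omega, by dsimp only; omega⟩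
    · simp only [Prod.mk.injEq]
      omega
    · have : (x + (u - x), y + (v - y)) = (u, v) := by
        rw [Prod.mk.injEq]; omega
      rw [this]; exact hmem

theorem loop_eq (n : Int) (cells : List (Int × Int))
    (hc : ∀ p : Int × Int, (p ∈ cells) ↔ (0 ≤ p.1 ∧ p.1 < n ∧ 0 ≤ p.2 ∧ p.2 < n)) :
    ∀ path, pvLoopA cells path = pvLoopB n path := by
  intro path
  induction path with
  | nil => rfl
  | cons a rest ih =>
    cases rest with
    | nil => rfl
    | cons b rest' =>
      obtain ⟨x1, y1⟩ := a
      obtain ⟨x2, y2⟩ := b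
      simp only [pvLoopA, pvLoopB, ih, mem_neighborsFinder, hc]
      split_ifs <;> first | rfl | (simp only [abs_le, lt_abs] at *; omega)

-- ===== VERDICT (by name: the statement is the Claim_ definition above) =====
theorem path_validy_spec : Claim_equal_path_validy := by
  intro board path _
  unfold Spec_path_validy path_validy path_validy_alt
  exact loop_eq _ _ (fun p => by
    obtain ⟨x, y⟩ := p
    exact mem_boardCoordinates board x y) path
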